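-- pv_equiv track=rewrite | github.com/CodyRooBoy/cs5060-project | src/game.py | check_x_in_row
-- ===== SOURCE A (Python) =====
-- def check_x_in_row(board, player, x):
--     rows, cols = len(board), len(board[0])
--     for row in range(rows):
--         for col in range(cols - (x - 1)):
--             if all(board[row][col + i] == player for i in range(x)):
--                 return True
--
--     for col in range(cols):
--         for row in range(rows - (x - 1)):
--             if all(board[row + i][col] == player for i in range(x)):
--                 return True
--
--     for row in range(rows - (x - 1)):
--         for col in range(cols - (x - 1)):
--             if all(board[row + i][col + i] == player for i in range(x)):
--                 return True
--
--     for row in range((x - 1), rows):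
--         for col in range(cols - (x - 1)):
--             if all(board[row - i][col + i] == player for i in range(x)):
--                 return True
--
--     return False
-- ===== SOURCE B (Python) =====
-- def check_x_in_row(board, player, x):
--     rows, cols = len(board), len(board[0])
--
--     def hits(line):
--         # running consecutive-match counter: O(1) per cell, no length-x window re-scan
--         run = 0
--         for v in line:
--             run = run + 1 if v == player else 0
--             if run >= x:
--                 return True
--         return False
--
--     # horizontals
--     for r in range(rows):
--         if hits(board[r][c] for c in range(cols)):
--             return True
--     # verticals
--     for c in range(cols):
--         if hits(board[r][c] for r in range(rows)):
--             return True
--     # down-right diagonals (starts on the top row, then on the left column)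
--     for c0 in range(cols):
--         if hits(board[i][c0 + i] for i in range(min(rows, cols - c0))):
--             return True
--     for r0 in range(1, rows):
--         if hits(board[r0 + i][i] for i in range(min(rows - r0, cols))):
--             return True
--     # up-right diagonals (starts on the bottom row, then on the left column)
--     for c0 in range(cols):
--         if hits(board[rows - 1 - i][c0 + i] for i in range(min(rows, cols - c0))):
--             return True
--     for r0 in range(rows - 1):
--         if hits(board[r0 - i][i] for i in range(min(r0 + 1, cols))):
--             return True
--     return False
-- ===== Notes on version B (the rewrite author's own statement) =====
-- stated objective: alternative
-- what changed: A re-scans a full length-x window with all() at every start cell in four direction passes; B sweeps a running consecutive-match counter once along each row, column, down-right diagonal and up-right diagonal, doing O(1) update work per visited cell.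
-- outside the precondition, e.g. on check_x_in_row([[]], 1, 0): A returns True, B returns False; on check_x_in_row([[1, 2], [3]], 9, 3): A returns False, B raises IndexError
import Mathlib
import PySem

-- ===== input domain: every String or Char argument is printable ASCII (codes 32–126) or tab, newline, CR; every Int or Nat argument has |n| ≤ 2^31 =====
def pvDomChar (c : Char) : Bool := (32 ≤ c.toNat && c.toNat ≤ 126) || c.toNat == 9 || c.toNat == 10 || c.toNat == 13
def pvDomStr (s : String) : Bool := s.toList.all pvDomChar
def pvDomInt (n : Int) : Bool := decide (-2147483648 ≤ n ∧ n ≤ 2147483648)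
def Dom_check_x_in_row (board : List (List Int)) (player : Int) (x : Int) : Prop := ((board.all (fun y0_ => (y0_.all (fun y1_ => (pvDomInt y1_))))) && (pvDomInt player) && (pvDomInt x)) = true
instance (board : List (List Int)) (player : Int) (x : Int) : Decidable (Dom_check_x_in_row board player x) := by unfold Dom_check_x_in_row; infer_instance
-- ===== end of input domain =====

-- B replaces A's length-x window re-scan at every start cell by a running consecutive-match
-- counter swept once along every row, column and diagonal (a different algorithm, not measured faster).

-- ===== PORT A =====
-- board[r][c]: none = IndexError (excluded by Pre_)
def pvCell (b : List (List Int)) (r c : Int) : Option Int :=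
  (PySem.List.pyGet? b r).bind fun row => PySem.List.pyGet? row c

-- for row in range(a, b): if f(row): return True  — early-exit loop, as in Python
def pvAnyR (a b : Int) (f : Int → Bool) : Bool :=
  if h : a < b then f a || pvAnyR (a+1) b f else false
termination_by (b - a).toNat
decreasing_by omega

-- all(f(i) for i in range(a, b)) — early-exit generator, as in Python
def pvAllR (a b : Int) (f : Int → Bool) : Bool :=
  if h : a < b then f a && pvAllR (a+1) b f else true
termination_by (b - a).toNat
decreasing_by omega

def check_x_in_row (board : List (List Int)) (player : Int) (x : Int) : Bool :=
  let rows : Int := board.length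
  -- len(board[0]); board[0] raises IndexError on [] — excluded by Pre_, `.getD []` is junk there
  let cols : Int := ((PySem.List.pyGet? board 0).getD []).length
  (pvAnyR 0 rows fun row =>
    pvAnyR 0 (cols - (x-1)) fun col =>
      pvAllR 0 x fun i => pvCell board row (col+i) == some player)
  || (pvAnyR 0 cols fun col =>
      pvAnyR 0 (rows - (x-1)) fun row =>
        pvAllR 0 x fun i => pvCell board (row+i) col == some player)
  || (pvAnyR 0 (rows - (x-1)) fun row =>
      pvAnyR 0 (cols - (x-1)) fun col =>
        pvAllR 0 x fun i => pvCell board (row+i) (col+i) == some player)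
  || (pvAnyR (x-1) rows fun row =>
      pvAnyR 0 (cols - (x-1)) fun col =>
        pvAllR 0 x fun i => pvCell board (row-i) (col+i) == some player)

-- ===== PORT B =====
-- board[r][c] as an Int; default 0 only reachable outside Pre_
def pvCellD (b : List (List Int)) (r c : Int) : Int := (pvCell b r c).getD 0

-- B's helper `hits`: running consecutive-match counter along one line
def pvHits (player x : Int) : Int → List Int → Bool
  | _, [] => false
  | run, v :: rest =>
    let run' := if v = player then run + 1 else 0
    if x ≤ run' then true else pvHits player x run' rest

def check_x_in_row_alt (board : List (List Int)) (player : Int) (x : Int) : Bool :=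
  let rows : Int := board.length
  let cols : Int := ((PySem.List.pyGet? board 0).getD []).length
  -- horizontals
  ((PySem.List.pyRange 0 rows).any fun r =>
     pvHits player x 0 ((PySem.List.pyRange 0 cols).map fun c => pvCellD board r c))
  -- verticals
  || ((PySem.List.pyRange 0 cols).any fun c =>
     pvHits player x 0 ((PySem.List.pyRange 0 rows).map fun r => pvCellD board r c))
  -- down-right diagonals, starts on the top row then on the left column
  || ((PySem.List.pyRange 0 cols).any fun c0 =>
     pvHits player x 0 ((PySem.List.pyRange 0 (min rows (cols - c0))).map fun i => pvCellD board i (c0+i)))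
  || ((PySem.List.pyRange 1 rows).any fun r0 =>
     pvHits player x 0 ((PySem.List.pyRange 0 (min (rows - r0) cols)).map fun i => pvCellD board (r0+i) i))
  -- up-right diagonals, starts on the bottom row then on the left column
  || ((PySem.List.pyRange 0 cols).any fun c0 =>
     pvHits player x 0 ((PySem.List.pyRange 0 (min rows (cols - c0))).map fun i => pvCellD board (rows-1-i) (c0+i)))
  || ((PySem.List.pyRange 0 (rows-1)).any fun r0 =>
     pvHits player x 0 ((PySem.List.pyRange 0 (min (r0+1) cols)).map fun i => pvCellD board (r0-i) i))

-- ===== PRECONDITION & SPEC =====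
-- Pre_ excludes: the empty board (A raises IndexError at board[0]); for x ≥ 1, boards with a
-- row shorter than the first row, on which A's and B's index accesses may raise IndexError;
-- and the degenerate corner x ≤ 0 with an empty first row, where A's all() over range(x) is
-- vacuously true at nonexistent cells while B scans no cell — a corner no one would specify.
def Pre_check_x_in_row (board : List (List Int)) (player : Int) (x : Int) : Prop :=
  board ≠ [] ∧
    ((1 ≤ x ∧ ∀ row ∈ board, (board.headD []).length ≤ row.length) ∨
      (x ≤ 0 ∧ (board.headD []).length ≠ 0))
instance (board : List (List Int)) (player : Int) (x : Int) : Decidable (Pre_check_x_in_row board player x) := by unfold Pre_check_x_in_row; infer_instance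

def pvWitness_check_x_in_row : List (List Int) × Int × Int := ([[1, 0], [0, 1]], 1, 2)

def Spec_check_x_in_row (board : List (List Int)) (player : Int) (x : Int) (out : Bool) : Prop := out = check_x_in_row_alt board player x
instance (board : List (List Int)) (player : Int) (x : Int) (out : Bool) : Decidable (Spec_check_x_in_row board player x out) := by unfold Spec_check_x_in_row; infer_instance

-- ===== CLAIM (what is proved, stated in full; the proofs are below) =====
def Claim_equal_check_x_in_row : Prop := ∀ (board : List (List Int)) (player : Int) (x : Int), Dom_check_x_in_row board player x → Pre_check_x_in_row board player x → Spec_check_x_in_row board player x (check_x_in_row board player x)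

-- ===== LEMMAS AND PROOFS =====

lemma pvHits_aux (player x : Int) (hx : 1 ≤ x) (ln : List Int) :
    ∀ (run : Int), 0 ≤ run → run < x →
    (pvHits player x run ln = true ↔
      (((x - run).toNat ≤ ln.length ∧ ∀ i : Nat, i < (x - run).toNat → ln[i]? = some player)
      ∨ (∃ s : Nat, 1 ≤ s ∧ s + x.toNat ≤ ln.length ∧ ∀ i : Nat, i < x.toNat → ln[s+i]? = some player))) := by
  induction ln with
  | nil =>
    intro run h0 hlt
    simp only [pvHits, List.length_nil]
    apply iff_of_false (by simp)
    rintro (⟨h1, _⟩ | ⟨s, h1, h2, _⟩) <;> omega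
  | cons v rest ih =>
    intro run h0 hlt
    simp only [pvHits, List.length_cons]
    by_cases hv : v = player
    · rw [if_pos hv]
      by_cases hxr : x ≤ run + 1
      · rw [if_pos hxr]
        apply iff_of_true rfl
        left
        refine ⟨by omega, ?_⟩
        intro i hi
        have hi0 : i = 0 := by omega
        subst hi0
        simp [hv]
      · rw [if_neg hxr]
        rw [ih (run + 1) (by omega) (by omega)]
        constructor
        · rintro (⟨hl, hall⟩ | ⟨s, hs1, hsl, hall⟩)
          · left
            refine ⟨by omega, ?_⟩
            intro i hi
            cases i with
            | zero => simp [hv]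
            | succ j =>
              rw [List.getElem?_cons_succ]
              exact hall j (by omega)
          · right
            refine ⟨s + 1, by omega, by omega, ?_⟩
            intro i hi
            have e : s + 1 + i = (s + i) + 1 := by omega
            rw [e, List.getElem?_cons_succ]
            exact hall i hi
        · rintro (⟨hl, hall⟩ | ⟨s, hs1, hsl, hall⟩)
          · left
            refine ⟨by omega, ?_⟩
            intro i hi
            have := hall (i + 1) (by omega)
            rwa [List.getElem?_cons_succ] at this
          · match s, hs1 with
            | 1, _ =>
              left
              refine ⟨by omega, ?_⟩
              intro i hi
              have := hall i (by omega)
              have e : 1 + i = i + 1 := by omega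
              rwa [e, List.getElem?_cons_succ] at this
            | s'' + 2, _ =>
              right
              refine ⟨s'' + 1, by omega, by omega, ?_⟩
              intro i hi
              have := hall i hi
              have e : s'' + 2 + i = (s'' + 1 + i) + 1 := by omega
              rwa [e, List.getElem?_cons_succ] at this
    · rw [if_neg hv, if_neg (by omega : ¬ x ≤ (0:Int))]
      rw [ih 0 (by omega) (by omega)]
      have hx0 : (x - 0).toNat = x.toNat := by omega
      constructor
      · rintro (⟨hl, hall⟩ | ⟨s, hs1, hsl, hall⟩)
        · right
          refine ⟨1, by omega, by omega, ?_⟩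
          intro i hi
          have e : 1 + i = i + 1 := by omega
          rw [e, List.getElem?_cons_succ]
          exact hall i (by omega)
        · right
          refine ⟨s + 1, by omega, by omega, ?_⟩
          intro i hi
          have e : s + 1 + i = (s + i) + 1 := by omega
          rw [e, List.getElem?_cons_succ]
          exact hall i hi
      · rintro (⟨hl, hall⟩ | ⟨s, hs1, hsl, hall⟩)
        · exfalso
          have := hall 0 (by omega)
          rw [List.getElem?_cons_zero] at this
          exact hv (Option.some.inj this)
        · match s, hs1 with
          | 1, _ =>
            left
            refine ⟨by omega, ?_⟩
            intro i hi
            have := hall i (by omega)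
            have e : 1 + i = i + 1 := by omega
            rwa [e, List.getElem?_cons_succ] at this
          | s'' + 2, _ =>
            right
            refine ⟨s'' + 1, by omega, by omega, ?_⟩
            intro i hi
            have := hall i hi
            have e : s'' + 2 + i = (s'' + 1 + i) + 1 := by omega
            rwa [e, List.getElem?_cons_succ] at this

lemma pvHits_range (player x : Int) (hx : 1 ≤ x) (L : Nat) (f : Nat → Int) :
    (pvHits player x 0 ((List.range L).map f) = true ↔
      ∃ s : Nat, s + x.toNat ≤ L ∧ ∀ i : Nat, i < x.toNat → f (s + i) = player) := by
  rw [pvHits_aux player x hx _ 0 le_rfl (by omega)]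
  have hlen : ((List.range L).map f).length = L := by simp
  rw [hlen, show ((x:Int) - 0).toNat = x.toNat from by omega]
  have hget : ∀ j : Nat, j < L → ((List.range L).map f)[j]? = some (f j) := by
    intro j hj
    rw [List.getElem?_map, List.getElem?_range hj, Option.map_some]
  have hx0 : ((x : Int) - 0).toNat = x.toNat := by omega
  constructor
  · rintro (⟨hl, hall⟩ | ⟨s, hs1, hsl, hall⟩)
    · refine ⟨0, by omega, ?_⟩
      intro i hi
      rw [Nat.zero_add]
      have := hall i (by omega)
      rw [hget i (by omega)] at this
      exact Option.some.inj this
    · refine ⟨s, by omega, ?_⟩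
      intro i hi
      have := hall i hi
      rw [hget (s + i) (by omega)] at this
      exact Option.some.inj this
  · rintro ⟨s, hsl, hall⟩
    match s with
    | 0 =>
      left
      refine ⟨by omega, ?_⟩
      intro i hi
      have h2 := hall i (by omega)
      rw [Nat.zero_add] at h2
      rw [hget i (by omega), h2]
    | s' + 1 =>
      right
      refine ⟨s' + 1, by omega, by omega, ?_⟩
      intro i hi
      rw [hget (s' + 1 + i) (by omega), hall i hi]

lemma pv_cols_eq (board : List (List Int)) (h : board ≠ []) :
    ((PySem.List.pyGet? board 0).getD []) = board.headD [] := by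
  cases board with
  | nil => exact absurd rfl h
  | cons a l => simp [PySem.List.pyGet?, PySem.List.pyIdx?]

def pvP (board : List (List Int)) (player : Int) (r c : Nat) : Prop :=
  pvCell board ↑r ↑c = some player

lemma pvP_iff (board : List (List Int)) (player : Int)
    (hrect : ∀ row ∈ board, (board.headD []).length ≤ row.length)
    (r c : Nat) (hr : r < board.length) (hc : c < (board.headD []).length) :
    (pvCellD board ↑r ↑c = player) ↔ pvP board player r c := by
  have hcl : c < (board[r]'hr).length := lt_of_lt_of_le hc (hrect _ (List.getElem_mem hr))
  have hcell : pvCell board ↑r ↑c = some ((board[r]'hr)[c]'hcl) := by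
    unfold pvCell
    rw [PySem.List.pyGet?_natCast, List.getElem?_eq_getElem hr]
    show PySem.List.pyGet? (board[r]'hr) ↑c = _
    rw [PySem.List.pyGet?_natCast, List.getElem?_eq_getElem hcl]
  unfold pvP pvCellD
  rw [hcell]
  simp

lemma pv_diag_iff (P : Nat → Nat → Prop) (R C xt : Nat) (hxt : 1 ≤ xt) :
    (∃ r c : Nat, r + xt ≤ R ∧ c + xt ≤ C ∧ ∀ i : Nat, i < xt → P (r + i) (c + i)) ↔
    ((∃ c0 s : Nat, c0 < C ∧ s + xt ≤ min R (C - c0) ∧ ∀ i : Nat, i < xt → P (s + i) (c0 + (s + i)))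
     ∨ (∃ r0 s : Nat, 1 ≤ r0 ∧ r0 < R ∧ s + xt ≤ min (R - r0) C ∧ ∀ i : Nat, i < xt → P (r0 + (s + i)) (s + i))) := by
  constructor
  · rintro ⟨r, c, hr, hc, hall⟩
    by_cases hrc : r ≤ c
    · left
      refine ⟨c - r, r, by omega, by omega, ?_⟩
      intro i hi
      have e : c - r + (r + i) = c + i := by omega
      rw [e]
      exact hall i hi
    · right
      refine ⟨r - c, c, by omega, by omega, by omega, ?_⟩
      intro i hi
      have e : r - c + (c + i) = r + i := by omega
      rw [e]
      exact hall i hi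
  · rintro (⟨c0, s, hc0, hs, hall⟩ | ⟨r0, s, hr1, hr0, hs, hall⟩)
    · refine ⟨s, c0 + s, by omega, by omega, ?_⟩
      intro i hi
      have e : c0 + s + i = c0 + (s + i) := by omega
      rw [e]
      exact hall i hi
    · refine ⟨r0 + s, s, by omega, by omega, ?_⟩
      intro i hi
      have e : r0 + s + i = r0 + (s + i) := by omega
      rw [e]
      exact hall i hi

lemma pv_anti_iff (P : Nat → Nat → Prop) (R C xt : Nat) (hxt : 1 ≤ xt) :
    (∃ r c : Nat, xt ≤ r + 1 ∧ r < R ∧ c + xt ≤ C ∧ ∀ i : Nat, i < xt → P (r - i) (c + i)) ↔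
    ((∃ c0 s : Nat, c0 < C ∧ s + xt ≤ min R (C - c0) ∧ ∀ i : Nat, i < xt → P (R - 1 - (s + i)) (c0 + (s + i)))
     ∨ (∃ r0 s : Nat, r0 < R - 1 ∧ s + xt ≤ min (r0 + 1) C ∧ ∀ i : Nat, i < xt → P (r0 - (s + i)) (s + i))) := by
  constructor
  · rintro ⟨r, c, hxr, hr, hc, hall⟩
    by_cases hrc : R - 1 - r ≤ c
    · left
      refine ⟨c - (R - 1 - r), R - 1 - r, by omega, by omega, ?_⟩
      intro i hi
      have e1 : R - 1 - (R - 1 - r + i) = r - i := by omega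
      have e2 : c - (R - 1 - r) + (R - 1 - r + i) = c + i := by omega
      rw [e1, e2]
      exact hall i hi
    · right
      refine ⟨r + c, c, by omega, by omega, ?_⟩
      intro i hi
      have e : r + c - (c + i) = r - i := by omega
      rw [e]
      exact hall i hi
  · rintro (⟨c0, s, hc0, hs, hall⟩ | ⟨r0, s, hr0, hs, hall⟩)
    · refine ⟨R - 1 - s, c0 + s, by omega, by omega, by omega, ?_⟩
      intro i hi
      have e1 : R - 1 - s - i = R - 1 - (s + i) := by omega
      have e2 : c0 + s + i = c0 + (s + i) := by omega
      rw [e1, e2]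
      exact hall i hi
    · refine ⟨r0 - s, s, by omega, by omega, by omega, ?_⟩
      intro i hi
      have e1 : r0 - s - i = r0 - (s + i) := by omega
      rw [e1]
      exact hall i hi
-- ===== PORT A =====
-- board[r][c]: none = IndexError (excluded by Pre_)

lemma pvAnyR_eq (a b : Int) (f : Int → Bool) : pvAnyR a b f = (PySem.List.pyRange a b).any f := by
  fun_induction pvAnyR a b f with
  | case1 a h ih =>
    rw [PySem.List.pyRange_one_cons h, List.any_cons, ih]
  | case2 a h =>
    rw [show PySem.List.pyRange a b = [] from by simp [PySem.List.pyRange]; omega]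
    rfl

lemma pvAllR_eq (a b : Int) (f : Int → Bool) : pvAllR a b f = (PySem.List.pyRange a b).all f := by
  fun_induction pvAllR a b f with
  | case1 a h ih =>
    rw [PySem.List.pyRange_one_cons h, List.all_cons, ih]
  | case2 a h =>
    rw [show PySem.List.pyRange a b = [] from by simp [PySem.List.pyRange]; omega]
    rfl

lemma pv_A_iff (board : List (List Int)) (player x : Int) (hx : 1 ≤ x) (hne : board ≠ []) :
    (check_x_in_row board player x = true ↔
      ((∃ r s : Nat, r < board.length ∧ s + x.toNat ≤ (board.headD []).length ∧
          ∀ i : Nat, i < x.toNat → pvP board player r (s + i))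
      ∨ (∃ c s : Nat, c < (board.headD []).length ∧ s + x.toNat ≤ board.length ∧
          ∀ i : Nat, i < x.toNat → pvP board player (s + i) c)
      ∨ (∃ r c : Nat, r + x.toNat ≤ board.length ∧ c + x.toNat ≤ (board.headD []).length ∧
          ∀ i : Nat, i < x.toNat → pvP board player (r + i) (c + i))
      ∨ (∃ r c : Nat, x.toNat ≤ r + 1 ∧ r < board.length ∧ c + x.toNat ≤ (board.headD []).length ∧
          ∀ i : Nat, i < x.toNat → pvP board player (r - i) (c + i)))) := by
  unfold check_x_in_row
  rw [pv_cols_eq board hne]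
  simp only [pvAnyR_eq, pvAllR_eq]
  simp only [Bool.or_eq_true, List.any_eq_true, List.all_eq_true, PySem.List.mem_pyRange_one,
    beq_iff_eq]
  set R : Nat := board.length with hR
  set C : Nat := (board.headD []).length with hC
  constructor
  · rintro (((⟨row, ⟨hr0, hrR⟩, col, ⟨hc0, hcC⟩, hall⟩ | ⟨col, ⟨hc0, hcC⟩, row, ⟨hr0, hrR⟩, hall⟩) |
        ⟨row, ⟨hr0, hrR⟩, col, ⟨hc0, hcC⟩, hall⟩) | ⟨row, ⟨hr0, hrR⟩, col, ⟨hc0, hcC⟩, hall⟩)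
    · left
      refine ⟨row.toNat, col.toNat, by omega, by omega, ?_⟩
      intro i hi
      have h := hall ↑i ⟨by omega, by omega⟩
      have e1 : ((row.toNat : Nat) : Int) = row := by omega
      have e2 : ((col.toNat + i : Nat) : Int) = col + ↑i := by omega
      unfold pvP
      rw [e1, e2]
      exact h
    · right; left
      refine ⟨col.toNat, row.toNat, by omega, by omega, ?_⟩
      intro i hi
      have h := hall ↑i ⟨by omega, by omega⟩
      have e1 : ((row.toNat + i : Nat) : Int) = row + ↑i := by omega
      have e2 : ((col.toNat : Nat) : Int) = col := by omega
      unfold pvP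
      rw [e1, e2]
      exact h
    · right; right; left
      refine ⟨row.toNat, col.toNat, by omega, by omega, ?_⟩
      intro i hi
      have h := hall ↑i ⟨by omega, by omega⟩
      have e1 : ((row.toNat + i : Nat) : Int) = row + ↑i := by omega
      have e2 : ((col.toNat + i : Nat) : Int) = col + ↑i := by omega
      unfold pvP
      rw [e1, e2]
      exact h
    · right; right; right
      refine ⟨row.toNat, col.toNat, by omega, by omega, by omega, ?_⟩
      intro i hi
      have h := hall ↑i ⟨by omega, by omega⟩
      have e1 : ((row.toNat - i : Nat) : Int) = row - ↑i := by omega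
      have e2 : ((col.toNat + i : Nat) : Int) = col + ↑i := by omega
      unfold pvP
      rw [e1, e2]
      exact h
  · rintro (⟨r, s, hr, hs, hall⟩ | ⟨c, s, hc, hs, hall⟩ | ⟨r, c, hr, hc, hall⟩ |
        ⟨r, c, hxr, hr, hc, hall⟩)
    · left; left; left
      refine ⟨↑r, ⟨by omega, by omega⟩, ↑s, ⟨by omega, by omega⟩, ?_⟩
      rintro i ⟨hi0, hix⟩
      have h := hall i.toNat (by omega)
      unfold pvP at h
      have e : ((s + i.toNat : Nat) : Int) = ↑s + i := by omega
      rw [e] at h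
      exact h
    · left; left; right
      refine ⟨↑c, ⟨by omega, by omega⟩, ↑s, ⟨by omega, by omega⟩, ?_⟩
      rintro i ⟨hi0, hix⟩
      have h := hall i.toNat (by omega)
      unfold pvP at h
      have e : ((s + i.toNat : Nat) : Int) = ↑s + i := by omega
      rw [e] at h
      exact h
    · left; right
      refine ⟨↑r, ⟨by omega, by omega⟩, ↑c, ⟨by omega, by omega⟩, ?_⟩
      rintro i ⟨hi0, hix⟩
      have h := hall i.toNat (by omega)
      unfold pvP at h
      have e1 : ((r + i.toNat : Nat) : Int) = ↑r + i := by omega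
      have e2 : ((c + i.toNat : Nat) : Int) = ↑c + i := by omega
      rw [e1, e2] at h
      exact h
    · right
      refine ⟨↑r, ⟨by omega, by omega⟩, ↑c, ⟨by omega, by omega⟩, ?_⟩
      rintro i ⟨hi0, hix⟩
      have h := hall i.toNat (by omega)
      unfold pvP at h
      have e1 : ((r - i.toNat : Nat) : Int) = ↑r - i := by omega
      have e2 : ((c + i.toNat : Nat) : Int) = ↑c + i := by omega
      rw [e1, e2] at h
      exact h

lemma pv_B_iff (board : List (List Int)) (player x : Int) (hx : 1 ≤ x) (hne : board ≠ [])
    (hrect : ∀ row ∈ board, (board.headD []).length ≤ row.length) :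
    (check_x_in_row_alt board player x = true ↔
      ((∃ r s : Nat, r < board.length ∧ s + x.toNat ≤ (board.headD []).length ∧
          ∀ i : Nat, i < x.toNat → pvP board player r (s + i))
      ∨ (∃ c s : Nat, c < (board.headD []).length ∧ s + x.toNat ≤ board.length ∧
          ∀ i : Nat, i < x.toNat → pvP board player (s + i) c)
      ∨ ((∃ c0 s : Nat, c0 < (board.headD []).length ∧
            s + x.toNat ≤ min board.length ((board.headD []).length - c0) ∧
            ∀ i : Nat, i < x.toNat → pvP board player (s + i) (c0 + (s + i)))
         ∨ (∃ r0 s : Nat, 1 ≤ r0 ∧ r0 < board.length ∧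
            s + x.toNat ≤ min (board.length - r0) (board.headD []).length ∧
            ∀ i : Nat, i < x.toNat → pvP board player (r0 + (s + i)) (s + i)))
      ∨ ((∃ c0 s : Nat, c0 < (board.headD []).length ∧
            s + x.toNat ≤ min board.length ((board.headD []).length - c0) ∧
            ∀ i : Nat, i < x.toNat → pvP board player (board.length - 1 - (s + i)) (c0 + (s + i)))
         ∨ (∃ r0 s : Nat, r0 < board.length - 1 ∧
            s + x.toNat ≤ min (r0 + 1) (board.headD []).length ∧
            ∀ i : Nat, i < x.toNat → pvP board player (r0 - (s + i)) (s + i))))) := by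
  unfold check_x_in_row_alt
  rw [pv_cols_eq board hne]
  simp only [Bool.or_eq_true, List.any_eq_true, PySem.List.mem_pyRange_one]
  set R : Nat := board.length with hR
  set C : Nat := (board.headD []).length with hC
  constructor
  · rintro (((((⟨r, ⟨hr0, hrR⟩, hh⟩ | ⟨c, ⟨hc0, hcC⟩, hh⟩) | ⟨c0, ⟨hc00, hc0C⟩, hh⟩) |
        ⟨r0, ⟨hr01, hr0R⟩, hh⟩) | ⟨c0, ⟨hc00, hc0C⟩, hh⟩) | ⟨r0, ⟨hr00, hr0R⟩, hh⟩)
    · left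
      rw [PySem.List.pyRange_zero_natCast, List.map_map, pvHits_range player x hx] at hh
      obtain ⟨s, hs, hall⟩ := hh
      refine ⟨r.toNat, s, by omega, by omega, ?_⟩
      intro i hi
      have h2 := hall i hi
      simp only [Function.comp_apply] at h2
      rw [show r = ((r.toNat : Nat) : Int) from by omega] at h2
      exact (pvP_iff board player hrect r.toNat (s + i) (by omega) (by omega)).mp h2
    · right; left
      rw [PySem.List.pyRange_zero_natCast, List.map_map, pvHits_range player x hx] at hh
      obtain ⟨s, hs, hall⟩ := hh
      refine ⟨c.toNat, s, by omega, by omega, ?_⟩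
      intro i hi
      have h2 := hall i hi
      simp only [Function.comp_apply] at h2
      rw [show c = ((c.toNat : Nat) : Int) from by omega] at h2
      exact (pvP_iff board player hrect (s + i) c.toNat (by omega) (by omega)).mp h2
    · right; right; left; left
      rw [show min (↑R : Int) (↑C - c0) = ((min R (C - c0.toNat) : Nat) : Int) from by omega,
        PySem.List.pyRange_zero_natCast, List.map_map, pvHits_range player x hx] at hh
      obtain ⟨s, hs, hall⟩ := hh
      refine ⟨c0.toNat, s, by omega, by omega, ?_⟩
      intro i hi
      have h2 := hall i hi
      simp only [Function.comp_apply] at h2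
      rw [show c0 + ((↑(s + i) : Int)) = ((c0.toNat + (s + i) : Nat) : Int) from by omega] at h2
      exact (pvP_iff board player hrect (s + i) (c0.toNat + (s + i)) (by omega) (by omega)).mp h2
    · right; right; left; right
      rw [show min ((↑R : Int) - r0) ↑C = ((min (R - r0.toNat) C : Nat) : Int) from by omega,
        PySem.List.pyRange_zero_natCast, List.map_map, pvHits_range player x hx] at hh
      obtain ⟨s, hs, hall⟩ := hh
      refine ⟨r0.toNat, s, by omega, by omega, by omega, ?_⟩
      intro i hi
      have h2 := hall i hi
      simp only [Function.comp_apply] at h2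
      rw [show r0 + ((↑(s + i) : Int)) = ((r0.toNat + (s + i) : Nat) : Int) from by omega] at h2
      exact (pvP_iff board player hrect (r0.toNat + (s + i)) (s + i) (by omega) (by omega)).mp h2
    · right; right; right; left
      rw [show min (↑R : Int) (↑C - c0) = ((min R (C - c0.toNat) : Nat) : Int) from by omega,
        PySem.List.pyRange_zero_natCast, List.map_map, pvHits_range player x hx] at hh
      obtain ⟨s, hs, hall⟩ := hh
      refine ⟨c0.toNat, s, by omega, by omega, ?_⟩
      intro i hi
      have h2 := hall i hi
      simp only [Function.comp_apply] at h2
      rw [show (↑R : Int) - 1 - ((↑(s + i) : Int)) = ((R - 1 - (s + i) : Nat) : Int) from by omega,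
        show c0 + ((↑(s + i) : Int)) = ((c0.toNat + (s + i) : Nat) : Int) from by omega] at h2
      exact (pvP_iff board player hrect (R - 1 - (s + i)) (c0.toNat + (s + i)) (by omega) (by omega)).mp h2
    · right; right; right; right
      rw [show min (r0 + 1) (↑C : Int) = ((min (r0.toNat + 1) C : Nat) : Int) from by omega,
        PySem.List.pyRange_zero_natCast, List.map_map, pvHits_range player x hx] at hh
      obtain ⟨s, hs, hall⟩ := hh
      refine ⟨r0.toNat, s, by omega, by omega, ?_⟩
      intro i hi
      have h2 := hall i hi
      simp only [Function.comp_apply] at h2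
      rw [show r0 - ((↑(s + i) : Int)) = ((r0.toNat - (s + i) : Nat) : Int) from by omega] at h2
      exact (pvP_iff board player hrect (r0.toNat - (s + i)) (s + i) (by omega) (by omega)).mp h2
  · rintro (⟨r, s, hr, hs, hall⟩ | ⟨c, s, hc, hs, hall⟩ |
        (⟨c0, s, hc0, hs, hall⟩ | ⟨r0, s, hr01, hr0, hs, hall⟩) |
        (⟨c0, s, hc0, hs, hall⟩ | ⟨r0, s, hr0, hs, hall⟩))
    · left; left; left; left; left
      refine ⟨↑r, ⟨by omega, by omega⟩, ?_⟩
      rw [PySem.List.pyRange_zero_natCast, List.map_map, pvHits_range player x hx]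
      refine ⟨s, by omega, ?_⟩
      intro i hi
      simp only [Function.comp_apply]
      exact (pvP_iff board player hrect r (s + i) (by omega) (by omega)).mpr (hall i hi)
    · left; left; left; left; right
      refine ⟨↑c, ⟨by omega, by omega⟩, ?_⟩
      rw [PySem.List.pyRange_zero_natCast, List.map_map, pvHits_range player x hx]
      refine ⟨s, by omega, ?_⟩
      intro i hi
      simp only [Function.comp_apply]
      exact (pvP_iff board player hrect (s + i) c (by omega) (by omega)).mpr (hall i hi)
    · left; left; left; right
      refine ⟨↑c0, ⟨by omega, by omega⟩, ?_⟩
      rw [show min (↑R : Int) (↑C - (↑c0 : Int)) = ((min R (C - c0) : Nat) : Int) from by omega,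
        PySem.List.pyRange_zero_natCast, List.map_map, pvHits_range player x hx]
      refine ⟨s, by omega, ?_⟩
      intro i hi
      simp only [Function.comp_apply]
      rw [show (↑c0 : Int) + ((↑(s + i) : Int)) = ((c0 + (s + i) : Nat) : Int) from by omega]
      exact (pvP_iff board player hrect (s + i) (c0 + (s + i)) (by omega) (by omega)).mpr (hall i hi)
    · left; left; right
      refine ⟨↑r0, ⟨by omega, by omega⟩, ?_⟩
      rw [show min ((↑R : Int) - (↑r0 : Int)) ↑C = ((min (R - r0) C : Nat) : Int) from by omega,
        PySem.List.pyRange_zero_natCast, List.map_map, pvHits_range player x hx]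
      refine ⟨s, by omega, ?_⟩
      intro i hi
      simp only [Function.comp_apply]
      rw [show (↑r0 : Int) + ((↑(s + i) : Int)) = ((r0 + (s + i) : Nat) : Int) from by omega]
      exact (pvP_iff board player hrect (r0 + (s + i)) (s + i) (by omega) (by omega)).mpr (hall i hi)
    · left; right
      refine ⟨↑c0, ⟨by omega, by omega⟩, ?_⟩
      rw [show min (↑R : Int) (↑C - (↑c0 : Int)) = ((min R (C - c0) : Nat) : Int) from by omega,
        PySem.List.pyRange_zero_natCast, List.map_map, pvHits_range player x hx]
      refine ⟨s, by omega, ?_⟩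
      intro i hi
      simp only [Function.comp_apply]
      rw [show (↑R : Int) - 1 - ((↑(s + i) : Int)) = ((R - 1 - (s + i) : Nat) : Int) from by omega,
        show (↑c0 : Int) + ((↑(s + i) : Int)) = ((c0 + (s + i) : Nat) : Int) from by omega]
      exact (pvP_iff board player hrect (R - 1 - (s + i)) (c0 + (s + i)) (by omega) (by omega)).mpr (hall i hi)
    · right
      refine ⟨↑r0, ⟨by omega, by omega⟩, ?_⟩
      rw [show min ((↑r0 : Int) + 1) ↑C = ((min (r0 + 1) C : Nat) : Int) from by omega,
        PySem.List.pyRange_zero_natCast, List.map_map, pvHits_range player x hx]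
      refine ⟨s, by omega, ?_⟩
      intro i hi
      simp only [Function.comp_apply]
      rw [show (↑r0 : Int) - ((↑(s + i) : Int)) = ((r0 - (s + i) : Nat) : Int) from by omega]
      exact (pvP_iff board player hrect (r0 - (s + i)) (s + i) (by omega) (by omega)).mpr (hall i hi)

theorem pv_main (board : List (List Int)) (player x : Int)
    (hne : board ≠ [])
    (hcond : (1 ≤ x ∧ ∀ row ∈ board, (board.headD []).length ≤ row.length) ∨
      (x ≤ 0 ∧ (board.headD []).length ≠ 0)) :
    check_x_in_row board player x = check_x_in_row_alt board player x := by
  rcases hcond with ⟨hx, hrect⟩ | ⟨hx', hC0⟩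
  · rw [Bool.eq_iff_iff, pv_A_iff board player x hx hne, pv_B_iff board player x hx hne hrect]
    have hxt : 1 ≤ x.toNat := by omega
    rw [pv_diag_iff (pvP board player) board.length (board.headD []).length x.toNat hxt,
      pv_anti_iff (pvP board player) board.length (board.headD []).length x.toNat hxt]
  · have hC : 0 < (board.headD []).length := by omega
    have hR : 0 < board.length := by
      cases board with
      | nil => exact absurd rfl hne
      | cons a l => simp
    have hA : check_x_in_row board player x = true := by
      unfold check_x_in_row
      rw [pv_cols_eq board hne]
      simp only [pvAnyR_eq, pvAllR_eq]
      simp only [Bool.or_eq_true, List.any_eq_true, List.all_eq_true,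
        PySem.List.mem_pyRange_one, beq_iff_eq]
      left; left; left
      refine ⟨0, ⟨le_rfl, by omega⟩, 0, ⟨le_rfl, by omega⟩, ?_⟩
      rintro i ⟨hi0, hix⟩
      omega
    have hB : check_x_in_row_alt board player x = true := by
      unfold check_x_in_row_alt
      rw [pv_cols_eq board hne]
      simp only [Bool.or_eq_true, List.any_eq_true, PySem.List.mem_pyRange_one]
      left; left; left; left; left
      refine ⟨0, ⟨le_rfl, by omega⟩, ?_⟩
      rw [PySem.List.pyRange_one_cons (by omega : (0:Int) < ((board.headD []).length : Int))]
      simp only [List.map_cons]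
      by_cases hv : pvCellD board (0:Int) (0:Int) = player
      · simp only [pvHits, hv, if_true]
        rw [if_pos (by omega : x ≤ (0:Int)+1)]
      · simp only [pvHits]
        rw [if_neg hv, if_pos (by omega : x ≤ (0:Int))]
    rw [hA, hB]

-- ===== VERDICT (by name: the statement is the Claim_ definition above) =====
theorem check_x_in_row_spec : Claim_equal_check_x_in_row := by
  intro board player x hdom hpre
  obtain ⟨hne, hcond⟩ := hpre
  unfold Spec_check_x_in_row
  exact pv_main board player x hne hcond
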